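-- pv_equiv track=rewrite | github.com/hypercommerce-vn/codebase-map | codebase_map/parsers/python_parser.py | _find_flows_for_node
-- ===== SOURCE A (Python) =====
-- def _find_flows_for_node(
--     flows_by_line: dict[int, list[str]], line_start: int
-- ) -> list[str]:
--     """Find nearest flow annotation within 5 lines above (or on) the def line."""
--     for offset in range(0, 6):
--         cand = flows_by_line.get(line_start - offset)
--         if cand:
--             return cand
--     return []
-- ===== SOURCE B (Python) =====
-- def _find_flows_for_node(
--     flows_by_line: dict[int, list[str]], line_start: int
-- ) -> list[str]:
--     """Find nearest flow annotation within 5 lines above (or on) the def line."""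
--     good = [l for l in flows_by_line
--             if line_start - 5 <= l <= line_start and flows_by_line[l]]
--     return flows_by_line[max(good)] if good else []
-- ===== Notes on version B (the rewrite author's own statement) =====
-- stated objective: alternative
-- what changed: Instead of probing the six fixed line offsets nearest-first with early return, B scans the dict's keys once, keeps the in-window keys with a non-empty flow list, and returns the value at the maximum such key (or [] if none).
import Mathlib
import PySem

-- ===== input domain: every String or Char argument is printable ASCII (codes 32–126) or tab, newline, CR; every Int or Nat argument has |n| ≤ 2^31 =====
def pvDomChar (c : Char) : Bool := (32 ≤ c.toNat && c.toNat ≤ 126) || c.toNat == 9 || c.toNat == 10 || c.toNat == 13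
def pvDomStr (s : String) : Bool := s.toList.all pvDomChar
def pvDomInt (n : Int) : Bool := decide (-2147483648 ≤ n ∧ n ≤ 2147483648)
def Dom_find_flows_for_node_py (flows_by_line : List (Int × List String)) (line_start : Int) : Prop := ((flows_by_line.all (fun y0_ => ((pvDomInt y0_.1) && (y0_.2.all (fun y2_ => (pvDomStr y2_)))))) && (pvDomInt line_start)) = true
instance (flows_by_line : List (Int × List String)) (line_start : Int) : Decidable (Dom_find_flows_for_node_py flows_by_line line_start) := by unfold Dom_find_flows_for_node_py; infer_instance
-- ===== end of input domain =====

-- B replaces A's nearest-first probe of six fixed offsets by one scan over the dict's keys,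
-- selecting the maximum in-window key with a non-empty flow list (objective: alternative).


-- ===== PORT A =====
-- the 'for offset in range(0, 6)' loop with its early return
def pvAloop (d : PySem.Dict Int (List String)) (line_start : Int) : List Int → List String
  | [] => []
  | o :: os =>
    match PySem.Dict.get? d (line_start - o) with
    | none => pvAloop d line_start os
    | some c => if c.isEmpty then pvAloop d line_start os else c

def find_flows_for_node_py (flows_by_line : List (Int × List String)) (line_start : Int) : List String :=
  pvAloop (PySem.Dict.mk flows_by_line) line_start (PySem.List.pyRange 0 6 1)

-- ===== PORT B =====
-- the comprehension: in-window keys whose flow list is non-empty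
def pvGood (flows_by_line : List (Int × List String)) (line_start : Int) : List Int :=
  (PySem.Dict.mk flows_by_line).keys.filter
    (fun l => decide (line_start - 5 ≤ l) && decide (l ≤ line_start)
      && !(PySem.Dict.getD (PySem.Dict.mk flows_by_line) l []).isEmpty)

def find_flows_for_node_py_alt (flows_by_line : List (Int × List String)) (line_start : Int) : List String :=
  match PySem.List.max? (pvGood flows_by_line line_start) id with
  | some m => PySem.Dict.getD (PySem.Dict.mk flows_by_line) m []
  | none => []

-- ===== PRECONDITION & SPEC =====
def Spec_find_flows_for_node_py (flows_by_line : List (Int × List String)) (line_start : Int) (out : List String) : Prop := out = find_flows_for_node_py_alt flows_by_line line_start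
instance (flows_by_line : List (Int × List String)) (line_start : Int) (out : List String) : Decidable (Spec_find_flows_for_node_py flows_by_line line_start out) := by unfold Spec_find_flows_for_node_py; infer_instance

-- ===== CLAIM (what is proved, stated in full; the proofs are below) =====
def Claim_equal_find_flows_for_node_py : Prop := ∀ (flows_by_line : List (Int × List String)) (line_start : Int), Dom_find_flows_for_node_py flows_by_line line_start → Spec_find_flows_for_node_py flows_by_line line_start (find_flows_for_node_py flows_by_line line_start)

-- ===== LEMMAS AND PROOFS =====

-- a falsy probe (missing key, or empty list) is skipped
lemma pvAloop_falsy (d : PySem.Dict Int (List String)) (ls o : Int) (os : List Int)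
    (h : PySem.Dict.getD d (ls - o) [] = []) :
    pvAloop d ls (o :: os) = pvAloop d ls os := by
  have heq : pvAloop d ls (o :: os) = (match PySem.Dict.get? d (ls - o) with
    | none => pvAloop d ls os
    | some c => if c.isEmpty then pvAloop d ls os else c) := rfl
  rw [heq]
  cases hg : PySem.Dict.get? d (ls - o) with
  | none => rfl
  | some c =>
    have hc : c = [] := by simpa [PySem.Dict.getD, hg] using h
    simp [hc]

-- a truthy probe returns its value
lemma pvAloop_truthy (d : PySem.Dict Int (List String)) (ls o : Int) (os : List Int)
    (h : PySem.Dict.getD d (ls - o) [] ≠ []) :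
    pvAloop d ls (o :: os) = PySem.Dict.getD d (ls - o) [] := by
  have heq : pvAloop d ls (o :: os) = (match PySem.Dict.get? d (ls - o) with
    | none => pvAloop d ls os
    | some c => if c.isEmpty then pvAloop d ls os else c) := rfl
  rw [heq]
  cases hg : PySem.Dict.get? d (ls - o) with
  | none => exact absurd (by simp [PySem.Dict.getD, hg]) h
  | some c =>
    have hc : c ≠ [] := by simpa [PySem.Dict.getD, hg] using h
    simp [PySem.Dict.getD, hg, hc]

-- a key with a non-empty stored list is among the dict's keys
lemma mem_keys_of_getD_ne (fb : List (Int × List String)) (l : Int)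
    (h : PySem.Dict.getD (PySem.Dict.mk fb) l [] ≠ []) :
    l ∈ (PySem.Dict.mk fb).keys := by
  unfold PySem.Dict.getD PySem.Dict.get? at h
  cases hf : List.find? (fun q => q.1 == l) (PySem.Dict.mk fb).items with
  | none => rw [hf] at h; simp at h
  | some q =>
    have hbeq : (q.1 == l) = true := by
      have := List.find?_some hf
      simpa using this
    have hmem : q ∈ (PySem.Dict.mk fb).items := List.mem_of_find?_eq_some hf
    have : q.1 = l := by simpa using hbeq
    subst this
    unfold PySem.Dict.keys
    exact List.mem_map_of_mem hmem

-- membership in pvGood, characterised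
lemma mem_pvGood (fb : List (Int × List String)) (ls l : Int) :
    l ∈ pvGood fb ls ↔
      (ls - 5 ≤ l ∧ l ≤ ls ∧ PySem.Dict.getD (PySem.Dict.mk fb) l [] ≠ []) := by
  unfold pvGood
  rw [List.mem_filter]
  constructor
  · rintro ⟨-, hb⟩
    simp only [Bool.and_eq_true, decide_eq_true_eq, Bool.not_eq_true',
      List.isEmpty_eq_false_iff] at hb
    exact ⟨hb.1.1, hb.1.2, hb.2⟩
  · rintro ⟨h1, h2, h3⟩
    refine ⟨mem_keys_of_getD_ne fb l h3, ?_⟩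
    simp only [Bool.and_eq_true, decide_eq_true_eq, Bool.not_eq_true',
      List.isEmpty_eq_false_iff]
    exact ⟨⟨h1, h2⟩, h3⟩

-- a fold whose step maps some to some keeps a some accumulator
lemma foldl_preserve_some {α : Type} (f : Option α → α → Option α)
    (hf : ∀ a x, ∃ b, f (some a) x = some b)
    (xs : List α) (a : α) : ∃ m, List.foldl f (some a) xs = some m := by
  induction xs generalizing a with
  | nil => exact ⟨a, rfl⟩
  | cons x xs ih =>
    obtain ⟨b, hb⟩ := hf a x
    rw [List.foldl_cons, hb]
    exact ih b

-- max? of a non-empty Int list is some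
lemma max?_isSome_of_mem {xs : List Int} {x : Int} (h : x ∈ xs) :
    ∃ m, PySem.List.max? xs id = some m := by
  cases xs with
  | nil => cases h
  | cons y ys =>
    unfold PySem.List.max?
    rw [List.foldl_cons]
    exact foldl_preserve_some _ (by
      intro a x
      dsimp only
      split <;> exact ⟨_, rfl⟩) ys y

-- B's value when m is the maximum element of pvGood
lemma alt_eq_of_max (fb : List (Int × List String)) (ls m : Int)
    (hm : m ∈ pvGood fb ls) (hmax : ∀ l ∈ pvGood fb ls, l ≤ m) :
    find_flows_for_node_py_alt fb ls = PySem.Dict.getD (PySem.Dict.mk fb) m [] := by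
  obtain ⟨m', hm'⟩ := max?_isSome_of_mem hm
  have hmem : m' ∈ pvGood fb ls := PySem.List.max?_mem hm'
  have h1 : m' ≤ m := hmax m' hmem
  have h2 : m ≤ m' := PySem.List.max?_isMax hm' m hm
  have : m' = m := le_antisymm h1 h2
  unfold find_flows_for_node_py_alt
  rw [hm', this]

-- B's value when pvGood is empty
lemma alt_eq_nil (fb : List (Int × List String)) (ls : Int)
    (h : ∀ l, l ∉ pvGood fb ls) :
    find_flows_for_node_py_alt fb ls = [] := by
  have : pvGood fb ls = [] := List.eq_nil_iff_forall_not_mem.mpr h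
  unfold find_flows_for_node_py_alt
  rw [this]
  rfl

-- ===== VERDICT (by name: the statement is the Claim_ definition above) =====
theorem find_flows_for_node_py_spec : Claim_equal_find_flows_for_node_py := by
  intro fb ls _
  unfold Spec_find_flows_for_node_py find_flows_for_node_py
  have hr : PySem.List.pyRange 0 6 1 = [0, 1, 2, 3, 4, 5] := by decide
  rw [hr]
  set d := PySem.Dict.mk fb with hd
  -- T o : probe at offset o is truthy
  by_cases h0 : PySem.Dict.getD d (ls - 0) [] = []
  case neg =>
    rw [pvAloop_truthy d ls 0 _ h0, alt_eq_of_max fb ls (ls - 0)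
      ((mem_pvGood fb ls _).mpr ⟨by omega, by omega, h0⟩)
      (fun l hl => by have := (mem_pvGood fb ls l).mp hl; omega)]
  case pos =>
  rw [pvAloop_falsy d ls 0 _ h0]
  by_cases h1 : PySem.Dict.getD d (ls - 1) [] = []
  case neg =>
    rw [pvAloop_truthy d ls 1 _ h1, alt_eq_of_max fb ls (ls - 1)
      ((mem_pvGood fb ls _).mpr ⟨by omega, by omega, h1⟩)
      (fun l hl => by
        obtain ⟨ha, hb, hc⟩ := (mem_pvGood fb ls l).mp hl
        have : l ≠ ls - 0 := fun e => hc (e ▸ h0)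
        omega)]
  case pos =>
  rw [pvAloop_falsy d ls 1 _ h1]
  by_cases h2 : PySem.Dict.getD d (ls - 2) [] = []
  case neg =>
    rw [pvAloop_truthy d ls 2 _ h2, alt_eq_of_max fb ls (ls - 2)
      ((mem_pvGood fb ls _).mpr ⟨by omega, by omega, h2⟩)
      (fun l hl => by
        obtain ⟨ha, hb, hc⟩ := (mem_pvGood fb ls l).mp hl
        have e0 : l ≠ ls - 0 := fun e => hc (e ▸ h0)
        have e1 : l ≠ ls - 1 := fun e => hc (e ▸ h1)
        omega)]
  case pos =>
  rw [pvAloop_falsy d ls 2 _ h2]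
  by_cases h3 : PySem.Dict.getD d (ls - 3) [] = []
  case neg =>
    rw [pvAloop_truthy d ls 3 _ h3, alt_eq_of_max fb ls (ls - 3)
      ((mem_pvGood fb ls _).mpr ⟨by omega, by omega, h3⟩)
      (fun l hl => by
        obtain ⟨ha, hb, hc⟩ := (mem_pvGood fb ls l).mp hl
        have e0 : l ≠ ls - 0 := fun e => hc (e ▸ h0)
        have e1 : l ≠ ls - 1 := fun e => hc (e ▸ h1)
        have e2 : l ≠ ls - 2 := fun e => hc (e ▸ h2)
        omega)]
  case pos =>
  rw [pvAloop_falsy d ls 3 _ h3]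
  by_cases h4 : PySem.Dict.getD d (ls - 4) [] = []
  case neg =>
    rw [pvAloop_truthy d ls 4 _ h4, alt_eq_of_max fb ls (ls - 4)
      ((mem_pvGood fb ls _).mpr ⟨by omega, by omega, h4⟩)
      (fun l hl => by
        obtain ⟨ha, hb, hc⟩ := (mem_pvGood fb ls l).mp hl
        have e0 : l ≠ ls - 0 := fun e => hc (e ▸ h0)
        have e1 : l ≠ ls - 1 := fun e => hc (e ▸ h1)
        have e2 : l ≠ ls - 2 := fun e => hc (e ▸ h2)
        have e3 : l ≠ ls - 3 := fun e => hc (e ▸ h3)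
        omega)]
  case pos =>
  rw [pvAloop_falsy d ls 4 _ h4]
  by_cases h5 : PySem.Dict.getD d (ls - 5) [] = []
  case neg =>
    rw [pvAloop_truthy d ls 5 _ h5, alt_eq_of_max fb ls (ls - 5)
      ((mem_pvGood fb ls _).mpr ⟨by omega, by omega, h5⟩)
      (fun l hl => by
        obtain ⟨ha, hb, hc⟩ := (mem_pvGood fb ls l).mp hl
        have e0 : l ≠ ls - 0 := fun e => hc (e ▸ h0)
        have e1 : l ≠ ls - 1 := fun e => hc (e ▸ h1)
        have e2 : l ≠ ls - 2 := fun e => hc (e ▸ h2)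
        have e3 : l ≠ ls - 3 := fun e => hc (e ▸ h3)
        have e4 : l ≠ ls - 4 := fun e => hc (e ▸ h4)
        omega)]
  case pos =>
  rw [pvAloop_falsy d ls 5 _ h5]
  rw [alt_eq_nil fb ls (fun l hl => by
    obtain ⟨ha, hb, hc⟩ := (mem_pvGood fb ls l).mp hl
    have : l = ls - 0 ∨ l = ls - 1 ∨ l = ls - 2 ∨ l = ls - 3 ∨ l = ls - 4 ∨ l = ls - 5 := by omega
    rcases this with e | e | e | e | e | e
    · exact hc (e ▸ h0)
    · exact hc (e ▸ h1)
    · exact hc (e ▸ h2)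
    · exact hc (e ▸ h3)
    · exact hc (e ▸ h4)
    · exact hc (e ▸ h5))]
  rfl
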